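-- pv_equiv track=rewrite | github.com/Alfiya-AT/Problem_of_the_day | NumbersContaining123.py | NumbersContaining123
-- ===== SOURCE A (Python) =====
-- def NumbersContaining123(arr):
--
--     # TC : O(n)
--     res=[]
--     val=[1,2,3]
--     for i in arr:
--         p=0
--         num=i
--         while num>0:
--             if (num%10) not in val:
--                 p=0
--                 break
--             else:
--                 p=1
--             num//=10
--         if p==1:
--             res.append(i)
--
--     return res if len(res)>0 else [-1]
-- ===== SOURCE B (Python) =====
-- def NumbersContaining123(arr):
--     res = [i for i in arr if all(c in '123' for c in str(i))]
--     return res if res else [-1]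
-- ===== Notes on version B (the rewrite author's own statement) =====
-- stated objective: idiomatic
-- what changed: B replaces A's flag-carrying while-loop that extracts digits with %10 and //10 by a comprehension testing every character of str(i) for membership in '123' (the '-' and '0' characters make negatives and zero fail naturally), keeping the [-1] fallback.
import Mathlib
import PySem

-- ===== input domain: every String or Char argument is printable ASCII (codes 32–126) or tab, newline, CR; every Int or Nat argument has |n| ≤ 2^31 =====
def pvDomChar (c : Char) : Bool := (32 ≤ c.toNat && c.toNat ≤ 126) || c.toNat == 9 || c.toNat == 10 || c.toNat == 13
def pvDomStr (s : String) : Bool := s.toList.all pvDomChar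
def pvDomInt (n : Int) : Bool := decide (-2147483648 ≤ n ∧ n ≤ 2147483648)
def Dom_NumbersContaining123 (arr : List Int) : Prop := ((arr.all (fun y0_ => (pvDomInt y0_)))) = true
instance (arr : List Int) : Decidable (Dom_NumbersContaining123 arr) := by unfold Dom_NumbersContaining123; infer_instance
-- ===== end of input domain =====

-- B tests the characters of str(i) for membership in '123' instead of A's flag-carrying %10 // 10 digit loop (idiomatic; same behaviour, incl. the [-1] fallback).

-- ===== PORT A =====
-- A's inner 'while num > 0' loop, carrying the flag p; returns 0 on the break ('not in val'), else the final p
def pvDigitLoop (num : Int) (p : Int) : Int :=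
  if _h : 0 < num then
    if PySem.Int.mod num 10 ∉ ([1, 2, 3] : List Int) then 0
    else pvDigitLoop (PySem.Int.floordiv num 10) 1
  else p
termination_by num.toNat
decreasing_by
  rw [PySem.Int.floordiv_eq_ediv_of_pos (by omega : (0:Int) < 10)]
  omega

def NumbersContaining123 (arr : List Int) : List Int :=
  let res := arr.foldl (fun res i => if pvDigitLoop i 0 = 1 then res ++ [i] else res) []
  if PySem.List.len res > 0 then res else [-1]

-- ===== PORT B =====
-- 'c in "123"' on a single character c is membership in its character list ['1','2','3'] (exact)
def NumbersContaining123_alt (arr : List Int) : List Int :=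
  let res := arr.filter (fun i => (PySem.Int.toChars i).all (fun c => ['1', '2', '3'].contains c))
  if res.isEmpty then [-1] else res

-- ===== PRECONDITION & SPEC =====
def Spec_NumbersContaining123 (arr : List Int) (out : List Int) : Prop := out = NumbersContaining123_alt arr
instance (arr : List Int) (out : List Int) : Decidable (Spec_NumbersContaining123 arr out) := by unfold Spec_NumbersContaining123; infer_instance

-- ===== CLAIM (what is proved, stated in full; the proofs are below) =====
def Claim_equal_NumbersContaining123 : Prop := ∀ (arr : List Int), Dom_NumbersContaining123 arr → Spec_NumbersContaining123 arr (NumbersContaining123 arr)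

-- ===== LEMMAS AND PROOFS =====

-- the common digit predicate: all base-10 digits of n are 1, 2 or 3 (vacuously true at 0)
def pvOk (n : Nat) : Bool :=
  if h : n = 0 then true
  else (n % 10 == 1 || n % 10 == 2 || n % 10 == 3) && pvOk (n / 10)
termination_by n
decreasing_by exact Nat.div_lt_self (by omega) (by omega)

lemma pvOk_zero : pvOk 0 = true := by simp [pvOk]

lemma pvOk_pos {n : Nat} (h : n ≠ 0) :
    pvOk n = ((n % 10 == 1 || n % 10 == 2 || n % 10 == 3) && pvOk (n / 10)) := by
  conv_lhs => rw [pvOk]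
  rw [dif_neg h]

lemma pvDigitLoop_eq (n : Nat) (hn : 0 < n) (p : Int) :
    pvDigitLoop (n : Int) p = if pvOk n then 1 else 0 := by
  induction n using Nat.strong_induction_on generalizing p with
  | _ n ih =>
    rw [pvDigitLoop]
    have hpos : (0 : Int) < (n : Int) := by exact_mod_cast hn
    rw [dif_pos hpos]
    have hm : PySem.Int.mod (n : Int) 10 = ((n % 10 : Nat) : Int) := by
      rw [PySem.Int.mod_eq_emod_of_pos (by omega)]; push_cast; ring
    have hf : PySem.Int.floordiv (n : Int) 10 = ((n / 10 : Nat) : Int) := by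
      rw [PySem.Int.floordiv_eq_ediv_of_pos (by omega)]; push_cast; ring
    rw [hm, hf]
    by_cases hd : n % 10 = 1 ∨ n % 10 = 2 ∨ n % 10 = 3
    · have hmem : ((n % 10 : Nat) : Int) ∈ ([1, 2, 3] : List Int) := by
        simp only [List.mem_cons, List.not_mem_nil, or_false]; omega
      rw [if_neg (not_not_intro hmem)]
      have hb : (n % 10 == 1 || n % 10 == 2 || n % 10 == 3) = true := by
        simp only [Bool.or_eq_true, beq_iff_eq]; omega
      by_cases hz : n / 10 = 0
      · rw [hz]
        rw [pvDigitLoop]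
        rw [dif_neg (by omega : ¬ (0:Int) < ((0:Nat):Int))]
        rw [pvOk_pos (by omega : n ≠ 0), hz, pvOk_zero, hb]
        rfl
      · rw [ih (n / 10) (Nat.div_lt_self hn (by omega)) (by omega) 1]
        rw [pvOk_pos (by omega : n ≠ 0), hb, Bool.true_and]
    · have hmem : ((n % 10 : Nat) : Int) ∉ ([1, 2, 3] : List Int) := by
        simp only [List.mem_cons, List.not_mem_nil, or_false]; omega
      rw [if_pos hmem]
      rw [pvOk_pos (by omega : n ≠ 0)]
      have hb : (n % 10 == 1 || n % 10 == 2 || n % 10 == 3) = false := by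
        simp only [Bool.or_eq_false_iff, beq_eq_false_iff_ne]; omega
      rw [hb, Bool.false_and]; rfl

lemma pvContains_digitChar (d : Nat) (h : d < 10) :
    (['1', '2', '3'].contains (Nat.digitChar d)) = (d == 1 || d == 2 || d == 3) := by
  interval_cases d <;> decide

lemma pvToDigitsCore_all (f : Nat) : ∀ (n : Nat) (acc : List Char), 0 < n → n < 10 ^ f →
    ((Nat.toDigitsCore 10 f n acc).all (fun c => ['1', '2', '3'].contains c))
      = (pvOk n && acc.all (fun c => ['1', '2', '3'].contains c)) := by
  induction f with
  | zero => intro n acc hn hlt; simp at hlt; omega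
  | succ f ih =>
    intro n acc hn hlt
    rw [Nat.toDigitsCore]
    by_cases hz : n / 10 = 0
    · rw [if_pos hz]
      rw [List.all_cons, pvContains_digitChar (n % 10) (by omega)]
      rw [pvOk_pos (by omega : n ≠ 0), hz, pvOk_zero, Bool.and_true]
    · rw [if_neg hz]
      have hlt' : n / 10 < 10 ^ f := by
        rw [Nat.div_lt_iff_lt_mul (by omega)]
        calc n < 10 ^ (f + 1) := hlt
          _ = 10 ^ f * 10 := pow_succ 10 f
      rw [ih (n / 10) _ (by omega) hlt']
      rw [List.all_cons, pvContains_digitChar (n % 10) (by omega)]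
      rw [pvOk_pos (by omega : n ≠ 0)]
      cases pvOk (n / 10) <;> cases h1 : (n % 10 == 1 || n % 10 == 2 || n % 10 == 3) <;>
        cases acc.all (fun c => ['1', '2', '3'].contains c) <;> simp

lemma pvSel_eq (i : Int) :
    decide (pvDigitLoop i 0 = 1) = (PySem.Int.toChars i).all (fun c => ['1', '2', '3'].contains c) := by
  rcases lt_trichotomy i 0 with h | h | h
  · have hA : pvDigitLoop i 0 = 0 := by rw [pvDigitLoop, dif_neg (by omega)]
    rw [hA]
    simp [PySem.Int.toChars, h]
  · subst h
    have hA : pvDigitLoop 0 0 = 0 := by rw [pvDigitLoop, dif_neg (by omega)]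
    rw [hA]
    decide
  · have hcast : i = ((i.toNat : Nat) : Int) := (Int.toNat_of_nonneg (le_of_lt h)).symm
    set n := i.toNat with hn
    have hnpos : 0 < n := by omega
    rw [hcast, pvDigitLoop_eq n hnpos 0]
    have hB : PySem.Int.toChars ((n : Nat) : Int) = Nat.toDigits 10 n := by
      simp [PySem.Int.toChars, Int.toNat_natCast]
    rw [hB, Nat.toDigits]
    have hlt : n < 10 ^ (n + 1) := by
      calc n < 10 ^ n := Nat.lt_pow_self (by omega)
        _ ≤ 10 ^ (n + 1) := Nat.pow_le_pow_right (by omega) (by omega)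
    rw [pvToDigitsCore_all (n + 1) n [] hnpos hlt]
    cases hok : pvOk n <;> simp

-- ===== VERDICT (by name: the statement is the Claim_ definition above) =====
theorem NumbersContaining123_spec : Claim_equal_NumbersContaining123 := by
  intro arr _
  unfold Spec_NumbersContaining123 NumbersContaining123 NumbersContaining123_alt
  rw [PySem.List.foldl_append_ite_eq_filter]
  have hfun : (fun x => decide (pvDigitLoop x 0 = 1))
      = (fun i => (PySem.Int.toChars i).all (fun c => ['1', '2', '3'].contains c)) :=
    funext pvSel_eq
  rw [List.nil_append, hfun]
  rcases hr : arr.filter (fun i => (PySem.Int.toChars i).all (fun c => ['1', '2', '3'].contains c))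
    with _ | ⟨a, l⟩ <;> simp [PySem.List.len_eq]
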